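-- pv_equiv track=rewrite | github.com/Lisheri/wechat_mcp_server | py_scripts/screenshot_manager/content_analysis.py | group_continuous_regions
-- ===== SOURCE A (Python) =====
-- def group_continuous_regions(high_density_columns, min_width=250, max_gap=5):
--     """将连续的高密度列分组为区域"""
--     if not high_density_columns:
--         return []
--
--     content_regions = []
--     start = high_density_columns[0]
--     end = start
--
--     for i in range(1, len(high_density_columns)):
--         if high_density_columns[i] - high_density_columns[i-1] <= max_gap:
--             end = high_density_columns[i]
--         else:
--             if end - start > min_width:
--                 content_regions.append((start, end))
--             start = high_density_columns[i]
--             end = start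
--
--     # 添加最后一个区域
--     if end - start > min_width:
--         content_regions.append((start, end))
--
--     return content_regions
-- ===== SOURCE B (Python) =====
-- def group_continuous_regions(high_density_columns, min_width=250, max_gap=5):
--     """Stateless staged decomposition: find the break indices, slice the list
--     into runs by boundary index pairs, then filter the wide regions."""
--     a = high_density_columns
--     if not a:
--         return []
--     breaks = [i for i in range(1, len(a)) if a[i] - a[i - 1] > max_gap]
--     bounds = [0] + breaks + [len(a)]
--     candidates = [(a[l], a[r - 1]) for l, r in zip(bounds, bounds[1:])]
--     return [(s, e) for (s, e) in candidates if e - s > min_width]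
-- ===== Notes on version B (the rewrite author's own statement) =====
-- stated objective: alternative
-- what changed: A makes one stateful index scan carrying running start/end registers and emitting regions inline with a trailing flush; B is stateless and staged: it first computes the list of break indices where the gap exceeds max_gap, forms consecutive boundary-index pairs, reconstructs each run's endpoints by indexing into the list, and finally filters the candidates by width in a separate pass.
import Mathlib
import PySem

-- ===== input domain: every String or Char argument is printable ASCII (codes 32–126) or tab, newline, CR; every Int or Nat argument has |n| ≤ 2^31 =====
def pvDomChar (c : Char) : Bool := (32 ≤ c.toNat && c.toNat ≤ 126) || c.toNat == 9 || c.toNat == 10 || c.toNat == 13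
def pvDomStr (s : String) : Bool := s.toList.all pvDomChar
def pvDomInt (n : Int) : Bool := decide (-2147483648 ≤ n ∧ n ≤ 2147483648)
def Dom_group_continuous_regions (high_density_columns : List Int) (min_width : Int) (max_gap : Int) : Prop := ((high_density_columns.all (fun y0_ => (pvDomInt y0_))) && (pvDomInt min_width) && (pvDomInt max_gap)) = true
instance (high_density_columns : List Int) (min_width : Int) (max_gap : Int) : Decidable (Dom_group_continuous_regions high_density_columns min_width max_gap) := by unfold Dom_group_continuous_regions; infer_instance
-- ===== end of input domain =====

-- B replaces A's stateful scan-with-inline-emission by a stateless staged computation: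
-- break indices first, then runs reconstructed from boundary index pairs, then a width filter.

-- ===== PORT A =====
-- literal port: index loop over range(1, len), state (content_regions, start, end), final flush
def group_continuous_regions (high_density_columns : List Int) (min_width : Int) (max_gap : Int) : List (Int × Int) :=
  if high_density_columns = [] then []
  else
    let start := PySem.List.pyGetD high_density_columns 0 0
    let st :=
      (PySem.List.pyRange 1 (high_density_columns.length : Int) 1).foldl
        (fun (acc : List (Int × Int) × Int × Int) i =>
          if PySem.List.pyGetD high_density_columns i 0 - PySem.List.pyGetD high_density_columns (i - 1) 0 ≤ max_gap then
            (acc.1, acc.2.1, PySem.List.pyGetD high_density_columns i 0)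
          else
            ((if min_width < acc.2.2 - acc.2.1 then acc.1 ++ [(acc.2.1, acc.2.2)] else acc.1),
             PySem.List.pyGetD high_density_columns i 0, PySem.List.pyGetD high_density_columns i 0))
        ([], start, start)
    if min_width < st.2.2 - st.2.1 then st.1 ++ [(st.2.1, st.2.2)] else st.1

-- ===== PORT B =====
-- literal port of Source B: break indices, boundary pairs, endpoint reconstruction by indexing, width filter
def group_continuous_regions_alt (high_density_columns : List Int) (min_width : Int) (max_gap : Int) : List (Int × Int) :=
  if high_density_columns = [] then []
  else
    let n : Int := high_density_columns.length
    let breaks := (PySem.List.pyRange 1 n 1).filter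
      (fun i => decide (max_gap < PySem.List.pyGetD high_density_columns i 0 - PySem.List.pyGetD high_density_columns (i - 1) 0))
    let bounds := 0 :: breaks ++ [n]
    let candidates := (bounds.zip bounds.tail).map
      (fun p => (PySem.List.pyGetD high_density_columns p.1 0, PySem.List.pyGetD high_density_columns (p.2 - 1) 0))
    candidates.filter (fun p => decide (min_width < p.2 - p.1))

-- ===== PRECONDITION & SPEC =====
def Spec_group_continuous_regions (high_density_columns : List Int) (min_width : Int) (max_gap : Int) (out : List (Int × Int)) : Prop := out = group_continuous_regions_alt high_density_columns min_width max_gap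
instance (high_density_columns : List Int) (min_width : Int) (max_gap : Int) (out : List (Int × Int)) : Decidable (Spec_group_continuous_regions high_density_columns min_width max_gap out) := by unfold Spec_group_continuous_regions; infer_instance

-- ===== CLAIM (what is proved, stated in full; the proofs are below) =====
def Claim_equal_group_continuous_regions : Prop := ∀ (high_density_columns : List Int) (min_width : Int) (max_gap : Int), Dom_group_continuous_regions high_density_columns min_width max_gap → Spec_group_continuous_regions high_density_columns min_width max_gap (group_continuous_regions high_density_columns min_width max_gap)

-- ===== LEMMAS AND PROOFS =====

def flushA (mw : Int) (st : List (Int × Int) × Int × Int) : List (Int × Int) :=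
  if mw < st.2.2 - st.2.1 then st.1 ++ [(st.2.1, st.2.2)] else st.1

-- the common recursive characterization of the sequence of maximal runs
def runsFrom (mg s e : Int) : List Int → List (Int × Int)
  | [] => [(s, e)]
  | x :: xs => if x - e ≤ mg then runsFrom mg s x xs else (s, e) :: runsFrom mg x x xs

lemma foldA_runs (xs : List Int) (mw mg : Int) : ∀ (m k : Nat) (regs : List (Int × Int)) (s e : Int),
    1 ≤ k → k + m = xs.length →
    e = PySem.List.pyGetD xs ((k : Int) - 1) 0 →
    flushA mw
      ((PySem.List.pyRange (k : Int) (xs.length : Int) 1).foldl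
        (fun (acc : List (Int × Int) × Int × Int) i =>
          if PySem.List.pyGetD xs i 0 - PySem.List.pyGetD xs (i - 1) 0 ≤ mg then
            (acc.1, acc.2.1, PySem.List.pyGetD xs i 0)
          else
            ((if mw < acc.2.2 - acc.2.1 then acc.1 ++ [(acc.2.1, acc.2.2)] else acc.1),
             PySem.List.pyGetD xs i 0, PySem.List.pyGetD xs i 0))
        (regs, s, e))
    = regs ++ (runsFrom mg s e (xs.drop k)).filter (fun p => decide (mw < p.2 - p.1))
  | 0, k, regs, s, e, hk1, hkm, he => by
    have hk : k = xs.length := by omega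
    subst hk
    rw [PySem.List.pyRange_one_eq_nil le_rfl]
    simp only [List.foldl_nil, List.drop_length, runsFrom, List.filter, flushA]
    by_cases h : mw < e - s <;> simp [h]
  | m + 1, k, regs, s, e, hk1, hkm, he => by
    have hklt : k < xs.length := by omega
    have hx : PySem.List.pyGetD xs (k : Int) 0 = xs[k] := by
      simp [List.getElem?_eq_getElem hklt]
    subst he
    rw [PySem.List.pyRange_one_cons (by exact_mod_cast hklt)]
    simp only [List.foldl_cons]
    rw [List.drop_eq_getElem_cons hklt]
    rw [show ((k : Int) + 1) = ((k + 1 : Nat) : Int) from by push_cast; ring]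
    have hcast : ((k + 1 : Nat) : Int) - 1 = (k : Int) := by push_cast; ring
    by_cases h : xs[k] - PySem.List.pyGetD xs ((k : Int) - 1) 0 ≤ mg
    · simp only [hx, h, if_pos, runsFrom]
      exact foldA_runs xs mw mg m (k + 1) regs s (xs[k]) (by omega) (by omega)
        (by rw [hcast, hx])
    · simp only [hx, h, if_neg, not_false_iff, runsFrom]
      rw [foldA_runs xs mw mg m (k + 1)
        (if mw < PySem.List.pyGetD xs ((k : Int) - 1) 0 - s then regs ++ [(s, PySem.List.pyGetD xs ((k : Int) - 1) 0)] else regs) (xs[k]) (xs[k]) (by omega) (by omega)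
        (by rw [hcast, hx])]
      by_cases hw : mw < PySem.List.pyGetD xs ((k : Int) - 1) 0 - s <;> simp [hw, List.filter]

-- B's boundary-pair reconstruction produces exactly the runs sequence
lemma bpairs (xs : List Int) (mg : Int) : ∀ (m k l : Nat), 1 ≤ k → l < k → k + m = xs.length →
    ((((l : Int) :: ((PySem.List.pyRange (k : Int) (xs.length : Int) 1).filter
        (fun i => decide (mg < PySem.List.pyGetD xs i 0 - PySem.List.pyGetD xs (i - 1) 0)) ++ [(xs.length : Int)])).zip
      ((PySem.List.pyRange (k : Int) (xs.length : Int) 1).filter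
        (fun i => decide (mg < PySem.List.pyGetD xs i 0 - PySem.List.pyGetD xs (i - 1) 0)) ++ [(xs.length : Int)])).map
      (fun p => (PySem.List.pyGetD xs p.1 0, PySem.List.pyGetD xs (p.2 - 1) 0)))
    = runsFrom mg (PySem.List.pyGetD xs (l : Int) 0) (PySem.List.pyGetD xs ((k : Int) - 1) 0) (xs.drop k)
  | 0, k, l, hk1, hlk, hkm => by
    have hk : k = xs.length := by omega
    subst hk
    rw [PySem.List.pyRange_one_eq_nil le_rfl]
    simp [runsFrom]
  | m + 1, k, l, hk1, hlk, hkm => by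
    have hklt : k < xs.length := by omega
    have hx : PySem.List.pyGetD xs (k : Int) 0 = xs[k] := by
      simp [List.getElem?_eq_getElem hklt]
    rw [PySem.List.pyRange_one_cons (by exact_mod_cast hklt)]
    rw [List.drop_eq_getElem_cons hklt]
    rw [show ((k : Int) + 1) = ((k + 1 : Nat) : Int) from by push_cast; ring]
    have hcast : ((k + 1 : Nat) : Int) - 1 = (k : Int) := by push_cast; ring
    simp only [List.filter_cons]
    by_cases h : xs[k] - PySem.List.pyGetD xs ((k : Int) - 1) 0 ≤ mg
    · have hdec : (decide (mg < PySem.List.pyGetD xs (k : Int) 0 - PySem.List.pyGetD xs ((k : Int) - 1) 0)) = false := by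
        simp [hx]; omega
      rw [hdec]
      simp only [Bool.false_eq_true, if_false, runsFrom, h, if_pos]
      rw [bpairs xs mg m (k + 1) l (by omega) (by omega) (by omega), hcast, hx]
    · have hdec : (decide (mg < PySem.List.pyGetD xs (k : Int) 0 - PySem.List.pyGetD xs ((k : Int) - 1) 0)) = true := by
        simp [hx]; omega
      rw [hdec]
      simp only [if_true, runsFrom, h, if_neg, not_false_iff]
      have ih := bpairs xs mg m (k + 1) k (by omega) (by omega) (by omega)
      rw [hcast, hx] at ih
      simp only [List.cons_append, List.zip_cons_cons, List.map_cons, ih]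

-- ===== VERDICT (by name: the statement is the Claim_ definition above) =====
theorem group_continuous_regions_spec : Claim_equal_group_continuous_regions := by
  intro xs mw mg _
  unfold Spec_group_continuous_regions group_continuous_regions group_continuous_regions_alt
  cases xs with
  | nil => simp
  | cons h t =>
    have hstart : PySem.List.pyGetD (h :: t) (0 : Int) 0 = h := by simp [PySem.List.pyGetD]
    have hA := foldA_runs (h :: t) mw mg t.length 1 [] h h le_rfl (by simp only [List.length_cons]; omega)
      (by simp [PySem.List.pyGetD])
    have hB := bpairs (h :: t) mg t.length 1 0 le_rfl Nat.one_pos (by simp only [List.length_cons]; omega)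
    simp only [Nat.cast_one, Nat.cast_zero, flushA, List.nil_append, List.drop_succ_cons,
      List.drop_zero, hstart, show (1 : Int) - 1 = 0 from by ring] at hA hB
    rw [if_neg (List.cons_ne_nil h t), if_neg (List.cons_ne_nil h t)]
    simp only [hstart, List.tail_cons]
    rw [hA]
    simp only [List.cons_append, List.nil_append, List.tail_cons]
    rw [hB]
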